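-- pv_equiv track=rewrite | github.com/sweetpotato15/Algorithm_Study | 프로그래머스/2/87390. n＾2 배열 자르기/n＾2 배열 자르기.py | solution
-- ===== SOURCE A (Python) =====
-- def solution(n, left, right):
--     x1, y1 = left//n, left%n
--     x2, y2 = right//n, right%n
--     answer = []
--     for i in range(x1, x2+1): # i행 시작 하는 숫자 : i+1
--         row = [i+1 for _ in range(i+1)] + list(range(i+2,n+1))
--         if x1 == x2:
--             answer = row[y1:y2+1]
--             return answer
--         if i == x1:
--             answer += row[y1:]
--         elif i == x2:
--             answer += row[:y2+1]
--         else: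
--             answer += row
--     return answer
-- ===== SOURCE B (Python) =====
-- def solution(n, left, right):
--     # value at flat index i of the n x n pattern is max(row, col) + 1
--     return [max(i // n, i % n) + 1 for i in range(left, right + 1)]
-- ===== Notes on version B (the rewrite author's own statement) =====
-- stated objective: simpler
-- what changed: Instead of materialising each n-element row and concatenating slices of it, B computes each requested entry directly with the closed-form per-index formula max(i//n, i%n)+1 over range(left, right+1); Pre_ keeps the problem's domain (1<=n, 0<=left<=right<n*n) plus the regions where both return [], and excludes n=0 (A raises) and other out-of-domain inputs where A's value is an accident of out-of-range slicing and negative floor division.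
-- outside the precondition, e.g. on solution(-2, 9, 10): A returns [], B returns [0, 1]; on solution(2, 3, 6): A returns [2, 3, 3, 3, 4], B returns [2, 3, 3, 4]; on solution(1, -4, -4): A returns [-2], B returns [1]
import Mathlib
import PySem

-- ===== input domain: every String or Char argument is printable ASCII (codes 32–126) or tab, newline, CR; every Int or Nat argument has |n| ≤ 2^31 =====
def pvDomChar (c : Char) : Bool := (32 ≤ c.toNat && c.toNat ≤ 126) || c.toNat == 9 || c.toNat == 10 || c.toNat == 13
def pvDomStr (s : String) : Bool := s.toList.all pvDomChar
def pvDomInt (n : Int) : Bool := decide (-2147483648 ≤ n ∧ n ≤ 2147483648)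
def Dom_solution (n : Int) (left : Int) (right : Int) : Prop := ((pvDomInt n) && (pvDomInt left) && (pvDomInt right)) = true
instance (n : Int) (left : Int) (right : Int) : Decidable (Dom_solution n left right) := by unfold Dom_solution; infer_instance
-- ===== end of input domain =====

-- B replaces A's row-building-and-slicing loop by the closed-form per-index value max(i//n, i%n)+1; Pre_ restricts to the problem's stated domain (1 ≤ n, 0 ≤ left ≤ right < n*n): outside it A raises for n = 0 and otherwise returns accidental values produced by out-of-range slicing and negative floor division.


-- ===== PORT A =====
-- row = [i+1 for _ in range(i+1)] + list(range(i+2, n+1))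
def rowA (n i : Int) : List Int :=
  ((PySem.List.pyRange 0 (i+1) 1).map (fun _ => i + 1)) ++ PySem.List.pyRange (i+2) (n+1) 1

-- one iteration of A's loop; the first component 'some r' models the early 'return answer'
def bodyA (n x1 y1 x2 y2 : Int) (st : Option (List Int) × List Int) (i : Int) :
    Option (List Int) × List Int :=
  match st with
  | (some r, ans) => (some r, ans)
  | (none, ans) =>
    let row := rowA n i
    if x1 = x2 then (some (PySem.List.slice row (some y1) (some (y2+1))), ans)
    else if i = x1 then (none, ans ++ PySem.List.slice row (some y1) none)
    else if i = x2 then (none, ans ++ PySem.List.slice row none (some (y2+1)))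
    else (none, ans ++ row)

def solution (n : Int) (left : Int) (right : Int) : List Int :=
  let x1 := PySem.Int.floordiv left n
  let y1 := PySem.Int.mod left n
  let x2 := PySem.Int.floordiv right n
  let y2 := PySem.Int.mod right n
  match (PySem.List.pyRange x1 (x2+1) 1).foldl (bodyA n x1 y1 x2 y2) (none, []) with
  | (some r, _) => r
  | (none, ans) => ans

-- ===== PORT B =====
-- the comprehension body: max(i // n, i % n) + 1
def fB (n k : Int) : Int := max (PySem.Int.floordiv k n) (PySem.Int.mod k n) + 1

def solution_alt (n : Int) (left : Int) (right : Int) : List Int :=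
  (PySem.List.pyRange left (right+1) 1).map (fB n)

-- ===== PRECONDITION & SPEC =====
-- Pre_ is the problem's stated domain (1 ≤ n and a window 0 ≤ left ≤ right < n*n), plus two
-- regions where both programs return []: the empty window right < left for 1 ≤ n, and for n ≤ -1
-- the window 1 ≤ right < left ≤ n*(n-1) whose rows are all empty; it excludes n = 0 (A raises
-- ZeroDivisionError) and other out-of-domain n/left/right, where A's value is an accident of
-- Python's out-of-range slicing and negative floor division (see claim cites).
def Pre_solution (n : Int) (left : Int) (right : Int) : Prop :=
  (1 ≤ n ∧ (right < left ∨ (0 ≤ left ∧ left ≤ right ∧ right < n * n)))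
  ∨ (n ≤ -1 ∧ 1 ≤ right ∧ right < left ∧ left ≤ n * (n - 1))
instance (n : Int) (left : Int) (right : Int) : Decidable (Pre_solution n left right) := by
  unfold Pre_solution; infer_instance
def pvWitness_solution : Int × Int × Int := (3, 2, 5)

def Spec_solution (n : Int) (left : Int) (right : Int) (out : List Int) : Prop :=
  out = solution_alt n left right
instance (n : Int) (left : Int) (right : Int) (out : List Int) : Decidable (Spec_solution n left right out) := by
  unfold Spec_solution; infer_instance

-- ===== CLAIM (what is proved, stated in full; the proofs are below) =====
def Claim_equal_solution : Prop := ∀ (n : Int) (left : Int) (right : Int),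
  Dom_solution n left right → Pre_solution n left right →
  Spec_solution n left right (solution n left right)

-- ===== LEMMAS AND PROOFS =====

-- the quotient/remainder of i*n + r by n, for 0 ≤ r < n
theorem divmod_exact (n i r : Int) (hn : 0 < n) (hr0 : 0 ≤ r) (hrn : r < n) :
    PySem.Int.floordiv (i*n + r) n = i ∧ PySem.Int.mod (i*n + r) n = r := by
  have hq : PySem.Int.floordiv (i*n + r) n = i := by
    rw [PySem.Int.floordiv_eq_iff_of_pos hn]
    constructor <;> nlinarith
  refine ⟨hq, ?_⟩
  have := PySem.Int.floordiv_mul_add_mod (i*n + r) n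
  rw [hq] at this; linarith

theorem fB_exact (n i r : Int) (hn : 0 < n) (hi : 0 ≤ i) (hr0 : 0 ≤ r) (hrn : r < n) :
    fB n (i*n + r) = max i r + 1 := by
  obtain ⟨h1, h2⟩ := divmod_exact n i r hn hr0 hrn
  simp [fB, h1, h2]

theorem rowA_length (n i : Int) (_hi : 0 ≤ i) (hin : i < n) :
    (rowA n i).length = n.toNat := by
  simp [rowA, PySem.List.length_pyRange_one]
  omega

theorem rowA_eq (n i : Int) (hi : 0 ≤ i) (hin : i < n) :
    rowA n i = (PySem.List.pyRange 0 n 1).map (fun j => max i j + 1) := by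
  apply List.ext_getElem
  · simp [rowA, PySem.List.length_pyRange_one]; omega
  · intro j h1 h2
    simp only [rowA, List.getElem_map, PySem.List.getElem_pyRange_one]
    have hlen : ((PySem.List.pyRange 0 (i+1) 1).map (fun _ => i + 1)).length = (i+1).toNat := by
      simp [PySem.List.length_pyRange_one]
    by_cases hj : j < (i+1).toNat
    · rw [List.getElem_append_left (by omega)]
      simp only [List.getElem_map]
      rw [max_def]
      split_ifs <;> omega
    · rw [List.getElem_append_right (by omega)]
      simp only [List.length_map, PySem.List.length_pyRange_one, PySem.List.getElem_pyRange_one]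
      rw [max_def]
      split_ifs <;> omega

-- master lemma: a drop/take window of row i is the per-index formula over the matching flat range
theorem window_eq (n i : Int) (a b : Nat) (hn : 0 < n) (hi : 0 ≤ i) (hin : i < n)
    (hab : a ≤ b) (hbn : (b : Int) ≤ n) :
    ((rowA n i).drop a).take (b - a) =
      (PySem.List.pyRange (i*n + (a:Int)) (i*n + (b:Int)) 1).map (fB n) := by
  rw [rowA_eq n i hi (by omega)]
  apply List.ext_getElem
  · have : i*n + (b:Int) - (i*n + (a:Int)) = (b:Int) - (a:Int) := by ring
    simp [PySem.List.length_pyRange_one, this]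
    omega
  · intro t h1 h2
    simp only [List.getElem_take, List.getElem_drop, List.getElem_map,
      PySem.List.getElem_pyRange_one]
    have ht : t < b - a := by
      simp [PySem.List.length_pyRange_one] at h1
      omega
    have hr : (a : Int) + (t : Int) < n := by omega
    have key : i*n + (a:Int) + (t:Int) = i*n + ((a:Int) + (t:Int)) := by ring
    rw [key, fB_exact n i ((a:Int)+(t:Int)) hn hi (by omega) hr]
    push_cast
    ring_nf

-- A's three slice shapes, in formula form
theorem seg_from_eq (n i a : Int) (hn : 0 < n) (hi : 0 ≤ i) (hin : i < n)
    (ha : 0 ≤ a) (han : a ≤ n) :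
    PySem.List.slice (rowA n i) (some a) none =
      (PySem.List.pyRange (i*n + a) ((i+1)*n) 1).map (fB n) := by
  rw [PySem.List.slice_from _ ha]
  have h1 : (rowA n i).drop a.toNat = ((rowA n i).drop a.toNat).take (n.toNat - a.toNat) := by
    rw [List.take_of_length_le]
    simp [rowA_length n i hi hin]
  rw [h1, window_eq n i a.toNat n.toNat hn hi hin (by omega) (by omega)]
  rw [show ((a.toNat : Int)) = a by omega]
  rw [show i*n + ((n.toNat : Int)) = (i+1)*n by rw [show ((n.toNat : Int)) = n by omega]; ring]

theorem seg_to_eq (n i b : Int) (hn : 0 < n) (hi : 0 ≤ i) (hin : i < n)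
    (hb : 0 ≤ b) (hbn : b ≤ n) :
    PySem.List.slice (rowA n i) none (some b) =
      (PySem.List.pyRange (i*n) (i*n + b) 1).map (fB n) := by
  rw [PySem.List.slice_to _ hb]
  have h1 : (rowA n i).take b.toNat = ((rowA n i).drop 0).take (b.toNat - 0) := by simp
  rw [h1, window_eq n i 0 b.toNat hn hi hin (by omega) (by omega)]
  rw [show ((b.toNat : Int)) = b by omega]
  simp

theorem seg_mid_eq (n i a b : Int) (hn : 0 < n) (hi : 0 ≤ i) (hin : i < n)
    (ha : 0 ≤ a) (hab : a ≤ b) (hbn : b ≤ n) :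
    PySem.List.slice (rowA n i) (some a) (some b) =
      (PySem.List.pyRange (i*n + a) (i*n + b) 1).map (fB n) := by
  rw [PySem.List.slice_toNat _ ha (by omega)]
  rw [window_eq n i a.toNat b.toNat hn hi hin (by omega) (by omega)]
  rw [show ((a.toNat : Int)) = a by omega, show ((b.toNat : Int)) = b by omega]

theorem row_full_eq (n i : Int) (hn : 0 < n) (hi : 0 ≤ i) (hin : i < n) :
    rowA n i = (PySem.List.pyRange (i*n) ((i+1)*n) 1).map (fB n) := by
  have h1 : rowA n i = ((rowA n i).drop 0).take (n.toNat - 0) := by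
    rw [List.drop_zero, List.take_of_length_le]
    simp [rowA_length n i hi hin]
  rw [h1, window_eq n i 0 n.toNat hn hi hin (by omega) (by omega)]
  rw [show i*n + ((n.toNat : Int)) = (i+1)*n by rw [show ((n.toNat : Int)) = n by omega]; ring]
  simp

-- proof-side name for the list appended in iteration i when x1 ≠ x2
def segA (n x1 y1 x2 y2 i : Int) : List Int :=
  if i = x1 then PySem.List.slice (rowA n i) (some y1) none
  else if i = x2 then PySem.List.slice (rowA n i) none (some (y2+1))
  else rowA n i

theorem foldA_none (n x1 y1 x2 y2 : Int) (hx : x1 ≠ x2) :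
    ∀ (l : List Int) (ans : List Int),
      l.foldl (bodyA n x1 y1 x2 y2) (none, ans) = (none, ans ++ l.flatMap (segA n x1 y1 x2 y2)) := by
  intro l
  induction l with
  | nil => intro ans; simp
  | cons i l ih =>
    intro ans
    simp only [List.foldl_cons, List.flatMap_cons]
    have hb : bodyA n x1 y1 x2 y2 (none, ans) i = (none, ans ++ segA n x1 y1 x2 y2 i) := by
      unfold bodyA segA
      dsimp only
      rw [if_neg hx]
      split_ifs <;> rfl
    rw [hb, ih]
    simp [List.append_assoc]

theorem flatMap_congr' {α β : Type} (l : List α) (p q : α → List β)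
    (h : ∀ x ∈ l, p x = q x) : l.flatMap p = l.flatMap q := by
  induction l with
  | nil => rfl
  | cons x l ih =>
    simp only [List.flatMap_cons]
    rw [h x (by simp), ih (fun y hy => h y (by simp [hy]))]

-- concatenation of k full rows starting at row a
theorem mid_rows (n : Int) (hn : 0 < n) :
    ∀ (k : Nat) (a : Int),
      (PySem.List.pyRange a (a + (k:Int)) 1).flatMap
          (fun i => (PySem.List.pyRange (i*n) ((i+1)*n) 1).map (fB n)) =
        (PySem.List.pyRange (a*n) ((a + (k:Int))*n) 1).map (fB n) := by
  intro k
  induction k with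
  | zero =>
    intro a
    simp [PySem.List.pyRange_one_eq_nil (le_refl a)]
  | succ k ih =>
    intro a
    have hcons : PySem.List.pyRange a (a + ((k:Int)+1)) 1 = a :: PySem.List.pyRange (a+1) (a + ((k:Int)+1)) 1 :=
      PySem.List.pyRange_one_cons (by omega)
    push_cast
    rw [hcons]
    simp only [List.flatMap_cons]
    have hre : a + ((k:Int) + 1) = (a + 1) + (k:Int) := by ring
    rw [hre]
    rw [ih (a+1)]
    have hsplit : PySem.List.pyRange (a*n) (((a+1) + (k:Int))*n) 1 =
        PySem.List.pyRange (a*n) ((a+1)*n) 1 ++ PySem.List.pyRange ((a+1)*n) (((a+1) + (k:Int))*n) 1 :=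
      PySem.List.pyRange_one_append _ _ _ (by nlinarith) (by nlinarith)
    rw [hsplit, List.map_append]

theorem core_equiv (n x1 y1 x2 y2 : Int) (hn : 0 < n)
    (hx10 : 0 ≤ x1) (hx12 : x1 ≤ x2) (hx2n : x2 < n)
    (hy10 : 0 ≤ y1) (hy1n : y1 < n) (hy20 : 0 ≤ y2) (hy2n : y2 < n)
    (hle : x1 = x2 → y1 ≤ y2) :
    (match (PySem.List.pyRange x1 (x2+1) 1).foldl (bodyA n x1 y1 x2 y2) (none, []) with
     | (some r, _) => r
     | (none, ans) => ans)
      = (PySem.List.pyRange (x1*n + y1) (x2*n + y2 + 1) 1).map (fB n) := by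
  by_cases hx : x1 = x2
  · -- single row: early return of row[y1:y2+1]
    subst hx
    have hy12 : y1 ≤ y2 := hle rfl
    rw [PySem.List.pyRange_one_singleton]
    simp only [List.foldl_cons, List.foldl_nil]
    have hb : bodyA n x1 y1 x1 y2 (none, []) x1 =
        (some (PySem.List.slice (rowA n x1) (some y1) (some (y2+1))), []) := by
      simp [bodyA]
    rw [hb]
    rw [seg_mid_eq n x1 y1 (y2+1) hn hx10 (by omega) hy10 (by omega) (by omega)]
    rw [show x1*n + (y2+1) = x1*n + y2 + 1 from by ring]
  · -- multiple rows: no early return; the loop appends three kinds of segments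
    rw [foldA_none n x1 y1 x2 y2 hx (PySem.List.pyRange x1 (x2+1) 1) []]
    simp only [List.nil_append]
    have hsplit1 : PySem.List.pyRange x1 (x2+1) 1 =
        PySem.List.pyRange x1 (x1+1) 1 ++ PySem.List.pyRange (x1+1) (x2+1) 1 :=
      PySem.List.pyRange_one_append _ _ _ (by omega) (by omega)
    have hsplit2 : PySem.List.pyRange (x1+1) (x2+1) 1 =
        PySem.List.pyRange (x1+1) x2 1 ++ PySem.List.pyRange x2 (x2+1) 1 :=
      PySem.List.pyRange_one_append _ _ _ (by omega) (by omega)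
    rw [hsplit1, hsplit2, PySem.List.pyRange_one_singleton, PySem.List.pyRange_one_singleton]
    rw [List.flatMap_append, List.flatMap_append]
    simp only [List.flatMap_cons, List.flatMap_nil, List.append_nil]
    have hseg1 : segA n x1 y1 x2 y2 x1 = (PySem.List.pyRange (x1*n + y1) ((x1+1)*n) 1).map (fB n) := by
      rw [segA, if_pos rfl]
      exact seg_from_eq n x1 y1 hn hx10 (by omega) hy10 (by omega)
    have hseg2 : segA n x1 y1 x2 y2 x2 = (PySem.List.pyRange (x2*n) (x2*n + (y2+1)) 1).map (fB n) := by
      rw [segA, if_neg (by omega), if_pos rfl]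
      exact seg_to_eq n x2 (y2+1) hn (by omega) hx2n (by omega) (by omega)
    have hmid : (PySem.List.pyRange (x1+1) x2 1).flatMap (segA n x1 y1 x2 y2) =
        (PySem.List.pyRange ((x1+1)*n) (x2*n) 1).map (fB n) := by
      rw [flatMap_congr' _ _ (fun i => (PySem.List.pyRange (i*n) ((i+1)*n) 1).map (fB n)) ?_]
      · have hk : x2 = (x1+1) + ((x2 - (x1+1)).toNat : Int) := by omega
        calc (PySem.List.pyRange (x1+1) x2 1).flatMap
              (fun i => (PySem.List.pyRange (i*n) ((i+1)*n) 1).map (fB n))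
            = (PySem.List.pyRange (x1+1) ((x1+1) + ((x2 - (x1+1)).toNat : Int)) 1).flatMap
              (fun i => (PySem.List.pyRange (i*n) ((i+1)*n) 1).map (fB n)) := by rw [← hk]
          _ = (PySem.List.pyRange ((x1+1)*n) (((x1+1) + ((x2 - (x1+1)).toNat : Int))*n) 1).map (fB n) :=
              mid_rows n hn _ _
          _ = (PySem.List.pyRange ((x1+1)*n) (x2*n) 1).map (fB n) := by rw [← hk]
      · intro i hi
        rw [PySem.List.mem_pyRange_one] at hi
        rw [segA, if_neg (by omega), if_neg (by omega)]
        exact row_full_eq n i hn (by omega) (by omega)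
    rw [hseg1, hseg2, hmid]
    rw [← List.map_append, ← List.map_append]
    rw [← PySem.List.pyRange_one_append ((x1+1)*n) (x2*n) (x2*n + (y2+1))
          (mul_le_mul_of_nonneg_right (by omega) (le_of_lt hn)) (by omega)]
    rw [← PySem.List.pyRange_one_append (x1*n + y1) ((x1+1)*n) (x2*n + (y2+1))
          (by nlinarith) (by nlinarith [mul_le_mul_of_nonneg_right (show x1+1 ≤ x2 by omega) (le_of_lt hn)])]
    rw [show x2*n + (y2+1) = x2*n + y2 + 1 from by ring]

theorem key_equiv (n left right : Int) (hn : 1 ≤ n) (hl : 0 ≤ left) (hlr : left ≤ right)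
    (hr : right < n * n) : solution n left right = solution_alt n left right := by
  have hn' : 0 < n := hn
  set x1 := PySem.Int.floordiv left n with hx1def
  set y1 := PySem.Int.mod left n with hy1def
  set x2 := PySem.Int.floordiv right n with hx2def
  set y2 := PySem.Int.mod right n with hy2def
  have e1 : x1 * n + y1 = left := PySem.Int.floordiv_mul_add_mod left n
  have e2 : x2 * n + y2 = right := PySem.Int.floordiv_mul_add_mod right n
  have hy10 : 0 ≤ y1 := PySem.Int.mod_nonneg left hn'
  have hy1n : y1 < n := PySem.Int.mod_lt left hn'
  have hy20 : 0 ≤ y2 := PySem.Int.mod_nonneg right hn'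
  have hy2n : y2 < n := PySem.Int.mod_lt right hn'
  have hx10 : 0 ≤ x1 := by
    by_contra h
    push_neg at h
    have h1 : x1 ≤ -1 := by omega
    nlinarith [mul_le_mul_of_nonneg_right h1 (le_of_lt hn')]
  have hx12 : x1 ≤ x2 := by
    by_contra h
    push_neg at h
    have h1 : x2 + 1 ≤ x1 := by omega
    nlinarith [mul_le_mul_of_nonneg_right h1 (le_of_lt hn')]
  have hx2n : x2 < n := by
    by_contra h
    push_neg at h
    nlinarith [mul_le_mul_of_nonneg_right h (le_of_lt hn')]
  have hle : x1 = x2 → y1 ≤ y2 := by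
    intro h
    rw [h] at e1
    linarith
  show (match (PySem.List.pyRange x1 (x2+1) 1).foldl (bodyA n x1 y1 x2 y2) (none, []) with
        | (some r, _) => r
        | (none, ans) => ans) = solution_alt n left right
  rw [core_equiv n x1 y1 x2 y2 hn' hx10 hx12 hx2n hy10 hy1n hy20 hy2n hle]
  have eL : x1 * n + y1 = left := e1
  have eR : x2 * n + y2 + 1 = right + 1 := by linarith
  rw [eL, eR]
  rfl

theorem empty_equiv (n left right : Int) (hn : 1 ≤ n) (hrl : right < left) :
    solution n left right = solution_alt n left right := by
  have hn' : 0 < n := hn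
  set x1 := PySem.Int.floordiv left n with hx1def
  set y1 := PySem.Int.mod left n with hy1def
  set x2 := PySem.Int.floordiv right n with hx2def
  set y2 := PySem.Int.mod right n with hy2def
  have e1 : x1 * n + y1 = left := PySem.Int.floordiv_mul_add_mod left n
  have e2 : x2 * n + y2 = right := PySem.Int.floordiv_mul_add_mod right n
  have hy10 : 0 ≤ y1 := PySem.Int.mod_nonneg left hn'
  have hy1n : y1 < n := PySem.Int.mod_lt left hn'
  have hy20 : 0 ≤ y2 := PySem.Int.mod_nonneg right hn'
  have hy2n : y2 < n := PySem.Int.mod_lt right hn'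
  have hx21 : x2 ≤ x1 := by
    by_contra h
    push_neg at h
    have h1 : x1 + 1 ≤ x2 := by omega
    nlinarith [mul_le_mul_of_nonneg_right h1 (le_of_lt hn')]
  have hB : solution_alt n left right = [] := by
    show (PySem.List.pyRange left (right+1) 1).map (fB n) = []
    rw [PySem.List.pyRange_one_eq_nil (by omega)]
    rfl
  rw [hB]
  show (match (PySem.List.pyRange x1 (x2+1) 1).foldl (bodyA n x1 y1 x2 y2) (none, []) with
        | (some r, _) => r
        | (none, ans) => ans) = []
  by_cases hx : x1 = x2
  · -- same row, empty slice row[y1:y2+1] with y2 < y1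
    have hy21 : y2 < y1 := by rw [hx] at e1; linarith
    rw [← hx]
    rw [PySem.List.pyRange_one_singleton]
    simp only [List.foldl_cons, List.foldl_nil]
    have hb : bodyA n x1 y1 x1 y2 (none, []) x1 =
        (some (PySem.List.slice (rowA n x1) (some y1) (some (y2+1))), []) := by
      simp [bodyA]
    rw [hb]
    show PySem.List.slice (rowA n x1) (some y1) (some (y2+1)) = ([] : List Int)
    rw [PySem.List.slice_toNat _ hy10 (by omega)]
    rw [show (y2+1).toNat - y1.toNat = 0 from by omega]
    rfl
  · -- the loop body never runs: range(x1, x2+1) is empty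
    rw [PySem.List.pyRange_one_eq_nil (by omega)]
    rfl

theorem slice_nil_eq (a b : Option Int) : PySem.List.slice ([] : List Int) a b = [] := by
  cases a <;> cases b <;> simp [PySem.List.slice, PySem.List.clampIdx]

theorem rowA_nil (n i : Int) (hn : n ≤ -1) (h1 : n - 1 ≤ i) (h2 : i ≤ -1) : rowA n i = [] := by
  unfold rowA
  rw [PySem.List.pyRange_one_eq_nil (by omega), PySem.List.pyRange_one_eq_nil (by omega)]
  rfl

theorem neg_equiv (n left right : Int) (hn : n ≤ -1) (hr1 : 1 ≤ right) (hrl : right < left)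
    (hl : left ≤ n * (n - 1)) : solution n left right = solution_alt n left right := by
  have hn' : n < 0 := by omega
  set x1 := PySem.Int.floordiv left n with hx1def
  set y1 := PySem.Int.mod left n with hy1def
  set x2 := PySem.Int.floordiv right n with hx2def
  set y2 := PySem.Int.mod right n with hy2def
  have e1 : x1 * n + y1 = left := PySem.Int.floordiv_mul_add_mod left n
  have e2 : x2 * n + y2 = right := PySem.Int.floordiv_mul_add_mod right n
  have hy1b : n < y1 ∧ y1 ≤ 0 := PySem.Int.mod_neg_bounds left hn'
  have hy2b : n < y2 ∧ y2 ≤ 0 := PySem.Int.mod_neg_bounds right hn'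
  have hx1lo : n - 1 ≤ x1 := by
    by_contra h
    push_neg at h
    have h1 : x1 ≤ n - 2 := by omega
    have h2 : (n - 2) * n ≤ x1 * n := mul_le_mul_of_nonpos_right h1 (by omega)
    nlinarith
  have hx2hi : x2 ≤ -1 := by
    by_contra h
    push_neg at h
    have h1 : 0 ≤ x2 := by omega
    have h2 : x2 * n ≤ 0 := mul_nonpos_of_nonneg_of_nonpos h1 (by omega)
    omega
  have hB : solution_alt n left right = [] := by
    show (PySem.List.pyRange left (right+1) 1).map (fB n) = []
    rw [PySem.List.pyRange_one_eq_nil (by omega)]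
    rfl
  rw [hB]
  show (match (PySem.List.pyRange x1 (x2+1) 1).foldl (bodyA n x1 y1 x2 y2) (none, []) with
        | (some r, _) => r
        | (none, ans) => ans) = []
  by_cases hx : x1 = x2
  · -- one iteration: early return of a slice of the empty row
    rw [← hx]
    rw [PySem.List.pyRange_one_singleton]
    simp only [List.foldl_cons, List.foldl_nil]
    have hb : bodyA n x1 y1 x1 y2 (none, []) x1 =
        (some (PySem.List.slice (rowA n x1) (some y1) (some (y2+1))), []) := by
      simp [bodyA]
    rw [hb]
    show PySem.List.slice (rowA n x1) (some y1) (some (y2+1)) = ([] : List Int)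
    rw [rowA_nil n x1 hn hx1lo (by omega), slice_nil_eq]
  · -- every iterated row is empty, so every appended segment is empty
    rw [foldA_none n x1 y1 x2 y2 hx (PySem.List.pyRange x1 (x2+1) 1) []]
    simp only [List.nil_append]
    rw [flatMap_congr' _ _ (fun _ => ([] : List Int)) ?_]
    · simp
    · intro i hi
      rw [PySem.List.mem_pyRange_one] at hi
      have hrow : rowA n i = [] := rowA_nil n i hn (by omega) (by omega)
      unfold segA
      rw [hrow]
      split_ifs <;> simp [slice_nil_eq]

-- ===== VERDICT (by name: the statement is the Claim_ definition above) =====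
theorem solution_spec : Claim_equal_solution := by
  intro n left right _hdom hpre
  show solution n left right = solution_alt n left right
  rcases hpre with ⟨hn, hcase⟩ | ⟨hn, hr1, hrl, hl⟩
  · rcases hcase with hrl | ⟨hl, hlr, hr⟩
    · exact empty_equiv n left right hn hrl
    · exact key_equiv n left right hn hl hlr hr
  · exact neg_equiv n left right hn hr1 hrl hl
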